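-- pv_equiv track=rewrite | github.com/Lung-Yu/Blog-samples | deeplearning/pre_process/pca_down_sample.py | calc
-- ===== SOURCE A (Python) =====
-- def calc(ratios):
--     idx = []
--     accumulating_ratio = []
--     for i in range(len(ratios)+1):
--         temp = 0
--         for j in range(0,i):
--             temp += ratios[j]
--         idx.append(i)
--         accumulating_ratio.append(temp)
--     return idx,accumulating_ratio
-- ===== SOURCE B (Python) =====
-- def calc(ratios):
--     idx = [0]
--     accumulating_ratio = [0]
--     running = 0
--     for k, r in enumerate(ratios, 1):
--         running += r
--         idx.append(k)
--         accumulating_ratio.append(running)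
--     return idx, accumulating_ratio
-- ===== Notes on version B (the rewrite author's own statement) =====
-- stated objective: faster
-- what changed: Replaced the nested loop that recomputes each prefix sum from scratch with a single pass maintaining a running sum.
import Mathlib
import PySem

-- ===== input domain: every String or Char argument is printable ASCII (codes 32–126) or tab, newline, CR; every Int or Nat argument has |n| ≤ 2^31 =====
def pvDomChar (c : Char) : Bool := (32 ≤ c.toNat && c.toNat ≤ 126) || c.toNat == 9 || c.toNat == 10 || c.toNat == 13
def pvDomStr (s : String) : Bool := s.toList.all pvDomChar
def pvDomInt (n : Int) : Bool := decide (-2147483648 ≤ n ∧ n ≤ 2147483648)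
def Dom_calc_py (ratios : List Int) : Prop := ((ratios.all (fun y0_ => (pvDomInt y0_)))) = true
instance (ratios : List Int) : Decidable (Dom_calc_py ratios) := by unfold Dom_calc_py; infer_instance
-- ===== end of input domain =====

-- B replaces A's nested loop (each prefix sum recomputed from scratch) with one pass keeping a running sum.

-- ===== PORT A =====
-- literal port of A: for i in range(len+1): temp = sum of ratios[j] for j in range(0,i); append i, temp.
-- every index j satisfies 0 ≤ j < len(ratios), so ratios[j] never raises; ported as pyGetD with an unused default.
def calc_py (ratios : List Int) : List Int × List Int :=
  (PySem.List.pyRange 0 ((ratios.length : Int) + 1) 1).foldl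
    (fun (st : List Int × List Int) i =>
      let temp := (PySem.List.pyRange 0 i 1).foldl
        (fun t j => t + PySem.List.pyGetD ratios j 0) 0
      (st.1 ++ [i], st.2 ++ [temp]))
    ([], [])

-- ===== PORT B =====
-- structural recursion = Source B's single pass: k is the 1-based index, s the running sum.
def calcAltGo : List Int → Int → Int → List Int × List Int
  | [], _, _ => ([], [])
  | r :: rs, k, s =>
    let s' := s + r
    let rest := calcAltGo rs (k + 1) s'
    (k :: rest.1, s' :: rest.2)

def calc_py_alt (ratios : List Int) : List Int × List Int :=
  let rest := calcAltGo ratios 1 0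
  (0 :: rest.1, 0 :: rest.2)

-- ===== PRECONDITION & SPEC =====
def Spec_calc_py (ratios : List Int) (out : List Int × List Int) : Prop := out = calc_py_alt ratios
instance (ratios : List Int) (out : List Int × List Int) : Decidable (Spec_calc_py ratios out) := by unfold Spec_calc_py; infer_instance

-- ===== CLAIM (what is proved, stated in full; the proofs are below) =====
def Claim_equal_calc_py : Prop := ∀ (ratios : List Int), Dom_calc_py ratios → Spec_calc_py ratios (calc_py ratios)

-- ===== LEMMAS AND PROOFS =====

-- A's inner loop computes the sum of the first i elements.
lemma calc_inner (ratios : List Int) :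
    ∀ i : Nat, i ≤ ratios.length →
      (PySem.List.pyRange 0 (i : Int) 1).foldl
        (fun t j => t + PySem.List.pyGetD ratios j 0) 0 = (ratios.take i).sum := by
  intro i
  induction i with
  | zero => intro _; simp [PySem.List.pyRange_one_eq_nil (le_refl 0)]
  | succ n ih =>
    intro h
    have hr : PySem.List.pyRange 0 ((n : Int) + 1) 1
        = PySem.List.pyRange 0 (n : Int) 1 ++ [(n : Int)] :=
      PySem.List.pyRange_one_succ_right (by positivity)
    have hn : n < ratios.length := by omega
    push_cast
    rw [hr, List.foldl_append, ih (by omega)]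
    have hg : PySem.List.pyGetD ratios ((n : Nat) : Int) 0 = ratios[n] := by
      rw [PySem.List.pyGetD_natCast]
      simp [List.getD, List.getElem?_eq_getElem hn]
    simp only [List.foldl_cons, List.foldl_nil, hg, List.take_add_one,
      List.getElem?_eq_getElem hn, List.sum_append, Option.toList_some, List.sum_cons,
      List.sum_nil, add_zero]

-- A's outer append-loop, generalized over the accumulated lists and the per-index value g.
lemma calc_outer (g : Int → Int) :
    ∀ b : Nat, ∀ xs ys : List Int,
      (PySem.List.pyRange 0 (b : Int) 1).foldl
        (fun (st : List Int × List Int) i =>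
          let temp := g i
          (st.1 ++ [i], st.2 ++ [temp]))
        (xs, ys)
      = (xs ++ PySem.List.pyRange 0 (b : Int) 1,
         ys ++ (List.range b).map (fun i => g (i : Int))) := by
  intro b
  induction b with
  | zero => intro xs ys; simp [PySem.List.pyRange_one_eq_nil (le_refl 0)]
  | succ n ih =>
    intro xs ys
    have hr : PySem.List.pyRange 0 ((n : Int) + 1) 1
        = PySem.List.pyRange 0 (n : Int) 1 ++ [(n : Int)] :=
      PySem.List.pyRange_one_succ_right (by positivity)
    push_cast
    rw [hr, List.foldl_append, ih]
    simp [List.range_succ]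

-- B's pass: index stream and running sums in closed form.
lemma calcAltGo_eq (rs : List Int) :
    ∀ (k s : Int),
      calcAltGo rs k s
      = (PySem.List.pyRange k (k + rs.length) 1,
         (List.range rs.length).map (fun m => s + (rs.take (m + 1)).sum)) := by
  induction rs with
  | nil =>
    intro k s
    simp [calcAltGo]
  | cons r rs ih =>
    intro k s
    have hc : PySem.List.pyRange k (k + (((r :: rs).length : Nat) : Int)) 1
        = k :: PySem.List.pyRange (k + 1) (k + (((r :: rs).length : Nat) : Int)) 1 :=
      PySem.List.pyRange_one_cons (by simp)
    simp only [calcAltGo, ih]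
    rw [hc]
    refine Prod.ext ?_ ?_
    · show k :: PySem.List.pyRange (k + 1) (k + 1 + (rs.length : Int)) 1
        = k :: PySem.List.pyRange (k + 1) (k + (((r :: rs).length : Nat) : Int)) 1
      congr 2
      simp only [List.length_cons]
      push_cast
      omega
    · show (s + r) :: (List.range rs.length).map (fun m => s + r + (rs.take (m + 1)).sum)
        = ((List.range (r :: rs).length).map (fun m => s + ((r :: rs).take (m + 1)).sum))
      rw [List.length_cons, List.range_succ_eq_map]
      simp only [List.map_cons, List.map_map]
      refine congrArg₂ _ (by simp) ?_
      apply List.map_congr_left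
      intro m _
      simp [List.take_succ_cons]
      ring

-- both ports in the same closed form
lemma calc_py_closed (ratios : List Int) :
    calc_py ratios
      = (PySem.List.pyRange 0 (((ratios.length + 1 : Nat) : Nat) : Int) 1,
         (List.range (ratios.length + 1)).map (fun i => (ratios.take i).sum)) := by
  unfold calc_py
  have hcast : ((ratios.length : Int) + 1) = (((ratios.length + 1 : Nat) : Nat) : Int) := by
    push_cast; ring
  rw [hcast, calc_outer _ (ratios.length + 1) [] []]
  simp only [List.nil_append]
  refine congrArg _ ?_
  simp only [bind_pure_comp, List.map_eq_map, List.map_map]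
  apply List.map_congr_left
  intro i hi
  exact calc_inner ratios i (Nat.lt_succ_iff.mp (List.mem_range.mp hi))

lemma calc_py_alt_closed (ratios : List Int) :
    calc_py_alt ratios
      = (PySem.List.pyRange 0 (((ratios.length + 1 : Nat) : Nat) : Int) 1,
         (List.range (ratios.length + 1)).map (fun i => (ratios.take i).sum)) := by
  unfold calc_py_alt
  rw [calcAltGo_eq]
  refine Prod.ext ?_ ?_
  · show (0 : Int) :: PySem.List.pyRange 1 (1 + (ratios.length : Int)) 1
      = PySem.List.pyRange 0 (((ratios.length + 1 : Nat) : Nat) : Int) 1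
    have hc : PySem.List.pyRange 0 (((ratios.length + 1 : Nat) : Nat) : Int) 1
        = 0 :: PySem.List.pyRange 1 (((ratios.length + 1 : Nat) : Nat) : Int) 1 := by
      have := PySem.List.pyRange_one_cons
        (a := 0) (b := (((ratios.length + 1 : Nat) : Nat) : Int)) (by positivity)
      simpa using this
    rw [hc]
    congr 2
    push_cast
    ring
  · show (0 : Int) :: (List.range ratios.length).map (fun m => 0 + (ratios.take (m + 1)).sum)
      = (List.range (ratios.length + 1)).map (fun i => (ratios.take i).sum)
    rw [List.range_succ_eq_map]
    simp

-- ===== VERDICT (by name: the statement is the Claim_ definition above) =====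
theorem calc_py_spec : Claim_equal_calc_py := by
  intro ratios _
  unfold Spec_calc_py
  rw [calc_py_closed, calc_py_alt_closed]
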